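-- pv_equiv track=rewrite | github.com/GuilhermeBoia/graduation | algorithms/week2/lista2/E.py | can_win_with_k
-- ===== SOURCE A (Python) =====
-- def can_win_with_k(k, array):
--     n = len(array)
--     array = sorted(array)
--     for i in range(k):
--         threshold = k - i
--         index = -1
--         for j in range(len(array)):
--             if array[j] <= threshold:
--                 index = j
--                 break
--         if index == -1:
--             return False
--         array.pop(index)
--         if array:
--             array[-1] += threshold
--             array = sorted(array)
--     return True
-- ===== SOURCE B (Python) =====
-- def can_win_with_k(k, array):
--     a = sorted(array)
--     n = len(a)
--     i = 0       # pointer to the current minimum in the sorted snapshot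
--     boost = 0   # total amount added to the maximum element a[n-1]
--     for t in range(k, 0, -1):
--         if i == n:
--             return False
--         cur = a[i] + (boost if i == n - 1 else 0)
--         if cur > t:
--             return False
--         i += 1
--         if i < n:
--             boost += t
--     return True
-- ===== Notes on version B (the rewrite author's own statement) =====
-- stated objective: faster
-- what changed: A re-sorts the whole list and rescans for a pop candidate every round; B sorts once and replaces the pop/boost/re-sort cycle by an index pointer into the sorted snapshot plus an accumulator holding the total boost added to the maximum.
import Mathlib
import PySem

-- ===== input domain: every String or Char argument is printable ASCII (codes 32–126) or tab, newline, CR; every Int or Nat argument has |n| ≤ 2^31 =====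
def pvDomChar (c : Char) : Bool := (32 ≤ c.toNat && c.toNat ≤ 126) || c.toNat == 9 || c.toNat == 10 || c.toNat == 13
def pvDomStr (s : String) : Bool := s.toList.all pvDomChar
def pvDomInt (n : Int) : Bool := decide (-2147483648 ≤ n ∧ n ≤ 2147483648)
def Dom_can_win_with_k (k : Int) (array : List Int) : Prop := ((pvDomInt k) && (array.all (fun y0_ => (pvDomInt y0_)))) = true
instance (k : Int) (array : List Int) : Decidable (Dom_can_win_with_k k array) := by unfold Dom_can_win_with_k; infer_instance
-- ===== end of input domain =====

-- B replaces A's per-round rescan/pop/re-sort of the working list by one initial sort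
-- plus an index pointer and a boost accumulator (objective: faster).

-- ===== PORT A =====
-- inner scan: `index = -1; for j in range(len(array)): if array[j] <= threshold: index = j; break`
def pvFindIdxLe (arr : List Int) (t : Int) (j : Int) : Int :=
  match arr with
  | [] => -1
  | x :: xs => if x ≤ t then j else pvFindIdxLe xs t (j + 1)

-- the `for i in range(k)` loop: one call per loop index iv = 0, 1, …, k-1
def pvAGo (k : Int) (iv : Int) (arr : List Int) : Bool :=
  if _h : iv < k then
    let threshold := k - iv
    let index := pvFindIdxLe arr threshold 0
    if index = -1 then false
    else
      -- array.pop(index): the index returned by the scan is always in range, so getD is exact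
      let arr1 := ((PySem.List.pop? arr index).map Prod.snd).getD arr
      -- `if array: array[-1] += threshold` — arr1[-1] is exact: guarded by nonemptiness
      let arr2 := if arr1 = [] then arr1
        else arr1.dropLast ++ [(PySem.List.pyGet? arr1 (-1)).getD 0 + threshold]
      pvAGo k (iv + 1) (PySem.List.sorted arr2 (fun x => x) false)
  else true
termination_by (k - iv).toNat
decreasing_by omega

def can_win_with_k (k : Int) (array : List Int) : Bool :=
  pvAGo k 0 (PySem.List.sorted array (fun x => x) false)

-- ===== PORT B =====
-- the `for t in range(k, 0, -1)` loop of Source B, carrying the pointer i and the boost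
def pvBGo (a : List Int) (n : Int) (t : Int) (i : Int) (boost : Int) : Bool :=
  if _h : 0 < t then
    if i = n then false
    else
      -- a[i]: i is always in range here (0 ≤ i < n), so getD is exact
      let cur := (PySem.List.pyGet? a i).getD 0 + (if i = n - 1 then boost else 0)
      if cur > t then false
      else pvBGo a n (t - 1) (i + 1) (if i + 1 < n then boost + t else boost)
  else true
termination_by t.toNat
decreasing_by omega

def can_win_with_k_alt (k : Int) (array : List Int) : Bool :=
  let a := PySem.List.sorted array (fun x => x) false
  let n : Int := a.length
  pvBGo a n k 0 0

-- ===== PRECONDITION & SPEC =====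
def Spec_can_win_with_k (k : Int) (array : List Int) (out : Bool) : Prop := out = can_win_with_k_alt k array
instance (k : Int) (array : List Int) (out : Bool) : Decidable (Spec_can_win_with_k k array out) := by unfold Spec_can_win_with_k; infer_instance

-- ===== CLAIM (what is proved, stated in full; the proofs are below) =====
def Claim_equal_can_win_with_k : Prop := ∀ (k : Int) (array : List Int), Dom_can_win_with_k k array → Spec_can_win_with_k k array (can_win_with_k k array)

-- ===== LEMMAS AND PROOFS =====

-- A's working list when i elements have been popped from the sorted snapshot a and
-- boost has been added to the maximum: the suffix a[i:] with its last element boosted.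
def pvRep (a : List Int) (i : Nat) (boost : Int) : List Int :=
  if a.length ≤ i then []
  else (a.drop i).dropLast ++ [a.getLast?.getD 0 + boost]

lemma pvFind_neg (L : List Int) (t : Int) :
    ∀ j, (∀ x ∈ L, t < x) → pvFindIdxLe L t j = -1 := by
  induction L with
  | nil => intro j _; rfl
  | cons x xs ih =>
    intro j h
    have hx := h x (by simp)
    simp only [pvFindIdxLe, if_neg (by omega : ¬ x ≤ t)]
    exact ih (j + 1) (fun y hy => h y (by simp [hy]))

lemma pvGetLast?_drop (a : List Int) (i : Nat) (h : i < a.length) :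
    (a.drop i).getLast? = a.getLast? := by
  induction a generalizing i with
  | nil => simp at h
  | cons x xs ih =>
    cases i with
    | zero => simp
    | succ j =>
      have hj : j < xs.length := by simpa using h
      have hne : xs ≠ [] := by intro hnil; rw [hnil] at hj; simp at hj
      rw [List.drop_succ_cons, ih j hj]
      cases xs with
      | nil => simp at hj
      | cons y ys => simp

lemma pvRep_pairwise (a : List Int) (i : Nat) (boost : Int)
    (hs : a.Pairwise (· ≤ ·)) (hb : 0 ≤ boost) :
    (pvRep a i boost).Pairwise (· ≤ ·) := by
  unfold pvRep
  split
  · exact List.Pairwise.nil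
  · rename_i h
    have hi : i < a.length := by omega
    set l := a.drop i with hl
    have hlne : l ≠ [] := by
      intro hnil
      have := congrArg List.length hnil
      simp [hl] at this; omega
    have hlp : l.Pairwise (· ≤ ·) := List.Pairwise.sublist (List.drop_sublist i a) hs
    have hdecomp : l.dropLast ++ [l.getLast hlne] = l := List.dropLast_append_getLast hlne
    have hlp2 : (l.dropLast ++ [l.getLast hlne]).Pairwise (· ≤ ·) := by rw [hdecomp]; exact hlp
    rw [List.pairwise_append] at hlp2
    have hle : ∀ x ∈ l.dropLast, x ≤ l.getLast hlne := by
      intro x hx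
      exact hlp2.2.2 x hx (l.getLast hlne) (by simp)
    have hgl : a.getLast?.getD 0 = l.getLast hlne := by
      rw [← pvGetLast?_drop a i hi, ← hl, List.getLast?_eq_some_getLast hlne]
      rfl
    rw [List.pairwise_append]
    refine ⟨hlp2.1, by simp, ?_⟩
    intro x hx y hy
    simp at hy
    subst hy
    have := hle x hx
    rw [hgl]
    omega

lemma pvRep_zero (a : List Int) : pvRep a 0 0 = a := by
  unfold pvRep
  cases a with
  | nil => simp
  | cons x xs =>
    have hne : (x :: xs) ≠ [] := by simp
    rw [if_neg (by simp), List.drop_zero, add_zero,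
      List.getLast?_eq_some_getLast hne, Option.getD_some,
      List.dropLast_append_getLast hne]

-- main synchronised-loop invariant: after popping i elements of the sorted snapshot a
-- with total boost added to the maximum, A's remaining loop (at index k - t) and B's
-- remaining loop (at countdown t) agree.
lemma pvMain (N : Nat) (k : Int) (a : List Int) (hs : a.Pairwise (· ≤ ·)) :
    ∀ (t i boost : Int), t.toNat = N → 0 ≤ boost → 0 ≤ i → i ≤ (a.length : Int) →
    pvAGo k (k - t) (pvRep a i.toNat boost) = pvBGo a (a.length : Int) t i boost := by
  induction N with
  | zero =>
    intro t i boost hN hb hi hin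
    rw [pvAGo, pvBGo, dif_neg (by omega : ¬ k - t < k), dif_neg (by omega : ¬ (0:Int) < t)]
  | succ N ih =>
    intro t i boost hN hb hi hin
    have ht0 : 1 ≤ t := by omega
    rw [pvAGo, pvBGo, dif_pos (by omega : k - t < k), dif_pos (by omega : (0:Int) < t)]
    have hth : k - (k - t) = t := by ring
    rw [hth]
    by_cases hend : i = (a.length : Int)
    · rw [if_pos hend]
      have hrep : pvRep a i.toNat boost = [] := by unfold pvRep; rw [if_pos (by omega)]
      rw [hrep]
      simp
      intro hcontra
      exact absurd rfl hcontra
    · rw [if_neg hend]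
      have hlt : i < (a.length : Int) := lt_of_le_of_ne hin hend
      have hmlt : i.toNat < a.length := by omega
      have hdne : a.drop i.toNat ≠ [] := by
        intro hnil
        have := congrArg List.length hnil
        simp at this; omega
      obtain ⟨x, l', hxl⟩ := List.exists_cons_of_ne_nil hdne
      have hxval : (PySem.List.pyGet? a i).getD 0 = x := by
        rw [PySem.List.pyGet?_of_nonneg a hi, List.getElem?_eq_getElem hmlt,
          Option.getD_some]
        have h0 : (a.drop i.toNat)[0]'(by rw [hxl]; simp) = x := by simp [hxl]
        rw [← h0, List.getElem_drop]
        simp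
      have hlen := congrArg List.length hxl
      simp at hlen
      have hpw := pvRep_pairwise a i.toNat boost hs hb
      by_cases hfin : i.toNat + 1 = a.length
      -- this round pops the final (boosted) element
      · have hl' : l' = [] := by
          have : l'.length = 0 := by omega
          simpa using this
        have hgl : a.getLast?.getD 0 = x := by
          rw [← pvGetLast?_drop a i.toNat hmlt, hxl, hl']
          rfl
        have hrep : pvRep a i.toNat boost = [x + boost] := by
          unfold pvRep
          rw [if_neg (by omega), hxl, hl', hgl]
          simp
        rw [hrep, hxval, if_pos (show i = (a.length : Int) - 1 by omega)]
        by_cases hc : x + boost > t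
        · rw [if_pos hc]
          simp only [pvFindIdxLe]
          rw [if_neg (show ¬ x + boost ≤ t by omega)]
          simp
        · rw [if_neg hc]
          simp only [pvFindIdxLe]
          rw [if_pos (show x + boost ≤ t by omega),
            if_neg (show ¬ (0 : Int) = -1 by norm_num),
            PySem.List.pop?_zero_cons]
          simp only [Option.map_some, Option.getD_some, if_pos]
          rw [PySem.List.sorted_eq_self_of_pairwise ([] : List Int) (fun x => x) List.Pairwise.nil]
          have hrec := ih (t - 1) (i + 1) boost (by omega) hb (by omega) (by omega)
          have hrepn : pvRep a (i + 1).toNat boost = [] := by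
            unfold pvRep; rw [if_pos (by omega)]
          rw [hrepn] at hrec
          rw [show k - t + 1 = k - (t - 1) by ring, hrec,
            if_neg (show ¬ i + 1 < (a.length : Int) by omega)]
      -- this round pops a middle element: the boosted maximum stays at the back
      · have hl'ne : l' ≠ [] := by
          intro hnil
          rw [hnil] at hlen
          simp at hlen; omega
        obtain ⟨y, l'', hy⟩ := List.exists_cons_of_ne_nil hl'ne
        have hrep : pvRep a i.toNat boost
            = x :: (l'.dropLast ++ [a.getLast?.getD 0 + boost]) := by
          unfold pvRep
          rw [if_neg (by omega), hxl, hy]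
          rfl
        rw [hrep, hxval, if_neg (show ¬ i = (a.length : Int) - 1 by omega), add_zero]
        by_cases hc : x > t
        · rw [if_pos hc]
          have hall : pvFindIdxLe (x :: (l'.dropLast ++ [a.getLast?.getD 0 + boost])) t 0 = -1 := by
            apply pvFind_neg
            intro z hz
            rcases List.mem_cons.mp hz with h | h
            · omega
            · have hxz : x ≤ z := by
                rw [hrep] at hpw
                exact (List.pairwise_cons.mp hpw).1 z h
              omega
          simp [hall]
        · rw [if_neg hc]
          simp only [pvFindIdxLe]
          rw [if_pos (show x ≤ t by omega),
            if_neg (show ¬ (0 : Int) = -1 by norm_num),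
            PySem.List.pop?_zero_cons]
          simp only [Option.map_some, Option.getD_some]
          rw [if_neg (show l'.dropLast ++ [a.getLast?.getD 0 + boost] ≠ [] by simp)]
          rw [PySem.List.pyGet?_neg_one, List.getLast?_concat, Option.getD_some,
            List.dropLast_concat]
          have hdrop : a.drop (i + 1).toNat = l' := by
            have h1 : (i + 1).toNat = i.toNat + 1 := by omega
            rw [h1, ← List.drop_drop, hxl]
            rfl
          have harr2 : l'.dropLast ++ [a.getLast?.getD 0 + boost + t]
              = pvRep a (i + 1).toNat (boost + t) := by
            unfold pvRep
            rw [if_neg (by omega), hdrop, ← add_assoc]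
          rw [harr2]
          have hpw' := pvRep_pairwise a (i + 1).toNat (boost + t) hs (by omega)
          rw [PySem.List.sorted_eq_self_of_pairwise _ _ hpw']
          have hrec := ih (t - 1) (i + 1) (boost + t) (by omega) (by omega) (by omega) (by omega)
          rw [show k - t + 1 = k - (t - 1) by ring, hrec,
            if_pos (show i + 1 < (a.length : Int) by omega)]

-- ===== VERDICT (by name: the statement is the Claim_ definition above) =====
theorem can_win_with_k_spec : Claim_equal_can_win_with_k := by
  intro k array _
  unfold Spec_can_win_with_k can_win_with_k can_win_with_k_alt
  have hs : (PySem.List.sorted array (fun x => x) false).Pairwise (· ≤ ·) :=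
    PySem.List.sorted_pairwise array (fun x => x)
  have hmain := pvMain k.toNat k (PySem.List.sorted array (fun x => x) false) hs
    k 0 0 rfl le_rfl le_rfl (by omega)
  rw [Int.toNat_zero, pvRep_zero, sub_self] at hmain
  exact hmain
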